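-- pv_equiv track=rewrite | github.com/7h30th3r0n3/Evil-M5Core2 | utilities/WigleOpenFinder/WigleOpenFinder.py | extract_and_sort_ssids
-- ===== SOURCE A (Python) =====
-- def extract_and_sort_ssids(network_data):
--     ssids = set()
--     if network_data and 'results' in network_data:
--         for network in network_data['results']:
--             # Vérifie si le SSID existe avant de tenter de l'utiliser
--             ssid = network.get('ssid')
--             if ssid:  # Vérifie que le SSID n'est pas None ou vide
--                 ssids.add(ssid.strip())  # Utilise strip() ici après avoir vérifié que ssid n'est pas None
--     return sorted(ssids)
-- ===== SOURCE B (Python) =====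
-- def extract_and_sort_ssids(network_data):
--     collected = []
--     if network_data and 'results' in network_data:
--         for network in network_data['results']:
--             ssid = network.get('ssid')
--             if ssid:
--                 collected.append(ssid.strip())  # keep duplicates for now
--     collected.sort()
--     out = []
--     for s in collected:
--         if not out or s != out[-1]:
--             out.append(s)
--     return out
-- ===== Notes on version B (the rewrite author's own statement) =====
-- stated objective: alternative
-- what changed: B collects the stripped SSIDs into a plain list with duplicates, sorts it, and deduplicates in one adjacent-compare pass over the sorted list, instead of maintaining a hash set during the loop and sorting the set at the end.
import Mathlib
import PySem

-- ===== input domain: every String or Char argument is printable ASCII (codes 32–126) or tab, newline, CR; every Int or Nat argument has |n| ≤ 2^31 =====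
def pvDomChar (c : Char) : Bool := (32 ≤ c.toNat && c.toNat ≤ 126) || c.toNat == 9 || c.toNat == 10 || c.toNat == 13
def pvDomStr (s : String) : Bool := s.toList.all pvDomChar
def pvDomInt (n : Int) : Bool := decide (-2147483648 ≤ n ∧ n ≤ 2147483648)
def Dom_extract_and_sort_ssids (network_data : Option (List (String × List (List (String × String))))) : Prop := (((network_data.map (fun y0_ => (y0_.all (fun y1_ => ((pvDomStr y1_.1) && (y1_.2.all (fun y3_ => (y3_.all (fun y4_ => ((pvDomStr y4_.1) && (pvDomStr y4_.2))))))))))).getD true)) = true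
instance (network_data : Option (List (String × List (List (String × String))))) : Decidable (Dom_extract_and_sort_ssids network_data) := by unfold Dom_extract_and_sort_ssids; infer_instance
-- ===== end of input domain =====

-- B replaces A's set-then-sort by list-then-sort-then-adjacent-dedupe (objective: alternative, same cost).

-- ===== PORT A =====
def extract_and_sort_ssids (network_data : Option (List (String × List (List (String × String))))) : List String :=
  let ssids : PySem.Set String :=
    match network_data with
    | none => PySem.Set.empty
    | some d =>
      if d = [] then PySem.Set.empty  -- empty dict is falsy
      else
        match d.lookup "results" with
        | none => PySem.Set.empty
        | some results =>
          results.foldl (fun s network =>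
            match network.lookup "ssid" with
            | some ssid => if ssid ≠ "" then PySem.Set.add s (PySem.Str.strip ssid) else s
            | none => s) PySem.Set.empty
  PySem.List.sorted ssids (fun x => x) false

-- ===== PORT B =====
-- tail of the adjacent-dedupe pass: prev = last kept element
def dedupAdjAux : String → List String → List String
  | _, [] => []
  | p, y :: ys => if y = p then dedupAdjAux p ys else y :: dedupAdjAux y ys

-- 'out' empty: always keep the first element
def dedupAdj : List String → List String
  | [] => []
  | x :: xs => x :: dedupAdjAux x xs

def extract_and_sort_ssids_alt (network_data : Option (List (String × List (List (String × String))))) : List String :=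
  let collected : List String :=
    match network_data with
    | none => []
    | some d =>
      if d = [] then []
      else
        match d.lookup "results" with
        | none => []
        | some results =>
          results.foldl (fun acc network =>
            match network.lookup "ssid" with
            | some ssid => if ssid ≠ "" then acc ++ [PySem.Str.strip ssid] else acc
            | none => acc) []
  dedupAdj (PySem.List.sorted collected (fun x => x) false)

-- ===== PRECONDITION & SPEC =====
def Spec_extract_and_sort_ssids (network_data : Option (List (String × List (List (String × String))))) (out : List String) : Prop := out = extract_and_sort_ssids_alt network_data
instance (network_data : Option (List (String × List (List (String × String))))) (out : List String) : Decidable (Spec_extract_and_sort_ssids network_data out) := by unfold Spec_extract_and_sort_ssids; infer_instance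

-- ===== CLAIM (what is proved, stated in full; the proofs are below) =====
def Claim_equal_extract_and_sort_ssids : Prop := ∀ (network_data : Option (List (String × List (List (String × String))))), Dom_extract_and_sort_ssids network_data → Spec_extract_and_sort_ssids network_data (extract_and_sort_ssids network_data)

-- ===== LEMMAS AND PROOFS =====

-- the value a network contributes (stripped ssid if present and non-empty)
def pvContrib (network : List (String × String)) : Option String :=
  match network.lookup "ssid" with
  | some ssid => if ssid ≠ "" then some (PySem.Str.strip ssid) else none
  | none => none

theorem dedupAdjAux_cons (p y : String) (ys : List String) :
    dedupAdjAux p (y :: ys) = if y = p then dedupAdjAux p ys else y :: dedupAdjAux y ys := rfl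

theorem foldA_eq (rs : List (List (String × String))) (s : PySem.Set String) :
    rs.foldl (fun s network =>
      match network.lookup "ssid" with
      | some ssid => if ssid ≠ "" then PySem.Set.add s (PySem.Str.strip ssid) else s
      | none => s) s
    = (rs.filterMap pvContrib).foldl PySem.Set.add s := by
  induction rs generalizing s with
  | nil => rfl
  | cons n t ih =>
    cases hl : n.lookup "ssid" with
    | none =>
      have h1 : pvContrib n = none := by simp [pvContrib, hl]
      simpa [hl, h1] using ih s
    | some ssid =>
      by_cases he : ssid = ""
      · have h1 : pvContrib n = none := by simp [pvContrib, hl, he]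
        simpa [hl, he, h1] using ih s
      · have h1 : pvContrib n = some (PySem.Str.strip ssid) := by simp [pvContrib, hl, he]
        simpa [hl, he, h1] using ih (PySem.Set.add s (PySem.Str.strip ssid))

theorem foldB_eq (rs : List (List (String × String))) (acc : List String) :
    rs.foldl (fun acc network =>
      match network.lookup "ssid" with
      | some ssid => if ssid ≠ "" then acc ++ [PySem.Str.strip ssid] else acc
      | none => acc) acc
    = acc ++ rs.filterMap pvContrib := by
  induction rs generalizing acc with
  | nil => simp
  | cons n t ih =>
    cases hl : n.lookup "ssid" with
    | none =>
      have h1 : pvContrib n = none := by simp [pvContrib, hl]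
      simpa [hl, h1] using ih acc
    | some ssid =>
      by_cases he : ssid = ""
      · have h1 : pvContrib n = none := by simp [pvContrib, hl, he]
        simpa [hl, he, h1] using ih acc
      · have h1 : pvContrib n = some (PySem.Str.strip ssid) := by simp [pvContrib, hl, he]
        simpa [hl, he, h1] using ih (acc ++ [PySem.Str.strip ssid])

theorem mem_dedupAdjAux (l : List String) (p x : String) :
    x ∈ p :: dedupAdjAux p l ↔ x ∈ p :: l := by
  induction l generalizing p with
  | nil => rfl
  | cons y ys ih =>
    by_cases h : y = p
    · subst h
      rw [dedupAdjAux_cons, if_pos rfl, ih]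
      simp
    · rw [dedupAdjAux_cons, if_neg h]
      constructor
      · intro hx
        rcases List.mem_cons.mp hx with h1 | h1
        · exact h1 ▸ List.mem_cons_self
        · exact List.mem_cons_of_mem _ ((ih y).mp h1)
      · intro hx
        rcases List.mem_cons.mp hx with h1 | h1
        · exact h1 ▸ List.mem_cons_self
        · exact List.mem_cons_of_mem _ ((ih y).mpr h1)

theorem pairwise_dedupAdjAux (l : List String) (p : String)
    (h : (p :: l).Pairwise (· ≤ ·)) :
    (p :: dedupAdjAux p l).Pairwise (· < ·) := by
  induction l generalizing p with
  | nil => simp [dedupAdjAux]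
  | cons y ys ih =>
    rcases List.pairwise_cons.mp h with ⟨hp, hys⟩
    by_cases hyp : y = p
    · subst hyp
      rw [dedupAdjAux_cons, if_pos rfl]
      apply ih
      rcases List.pairwise_cons.mp hys with ⟨_, hys'⟩
      exact List.pairwise_cons.mpr ⟨fun z hz => hp z (List.mem_cons_of_mem _ hz), hys'⟩
    · rw [dedupAdjAux_cons, if_neg hyp]
      have hylt : p < y := lt_of_le_of_ne (hp y List.mem_cons_self) (fun e => hyp e.symm)
      have htail := ih y hys
      apply List.pairwise_cons.mpr
      refine ⟨fun z hz => ?_, htail⟩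
      rcases List.mem_cons.mp hz with h1 | h1
      · exact h1 ▸ hylt
      · have hzy : z ∈ y :: ys := (mem_dedupAdjAux ys y z).mp (List.mem_cons_of_mem _ h1)
        rcases List.mem_cons.mp hzy with h2 | h2
        · exact h2 ▸ hylt
        · exact lt_of_lt_of_le hylt (List.rel_of_pairwise_cons hys h2)

theorem sorted_set_eq_dedupAdj (L : List String) :
    PySem.List.sorted (PySem.Set.ofList L) (fun x => x) false
    = dedupAdj (PySem.List.sorted L (fun x => x) false) := by
  have hsortL : (PySem.List.sorted L (fun x => x) false).Pairwise (· ≤ ·) :=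
    PySem.List.sorted_pairwise L (fun x => x)
  have hlt : (dedupAdj (PySem.List.sorted L (fun x => x) false)).Pairwise (· < ·) := by
    cases hS : PySem.List.sorted L (fun x => x) false with
    | nil => simp [dedupAdj]
    | cons m t =>
      have := pairwise_dedupAdjAux t m (hS ▸ hsortL)
      simpa [dedupAdj] using this
  have hmem : ∀ x, x ∈ dedupAdj (PySem.List.sorted L (fun x => x) false) ↔ x ∈ PySem.Set.ofList L := by
    intro x
    cases hS : PySem.List.sorted L (fun x => x) false with
    | nil =>
      have hL : L = [] := (PySem.List.sorted_eq_nil_iff L (fun x => x) false).mp hS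
      subst hL
      simp [dedupAdj]
    | cons m t =>
      have h1 : x ∈ dedupAdj (m :: t) ↔ x ∈ m :: t := mem_dedupAdjAux t m x
      have h2 : x ∈ m :: t ↔ x ∈ L := by
        rw [← hS]; exact PySem.List.mem_sorted L (fun x => x) false x
      rw [h1, h2, PySem.Set.mem_ofList]
  have hperm : (dedupAdj (PySem.List.sorted L (fun x => x) false)).Perm (PySem.Set.ofList L) := by
    rw [List.perm_ext_iff_of_nodup (hlt.imp ne_of_lt) (PySem.Set.nodup_ofList L)]
    exact hmem
  exact PySem.List.sorted_eq_of_perm_of_pairwise_lt _ _ _ hperm hlt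

-- ===== VERDICT (by name: the statement is the Claim_ definition above) =====
theorem extract_and_sort_ssids_spec : Claim_equal_extract_and_sort_ssids := by
  intro nd _
  unfold Spec_extract_and_sort_ssids extract_and_sort_ssids extract_and_sort_ssids_alt
  cases nd with
  | none => rfl
  | some d =>
    by_cases hd : d = []
    · simp only [if_pos hd]; rfl
    · simp only [if_neg hd]
      cases hr : d.lookup "results" with
      | none => rfl
      | some results =>
        show PySem.List.sorted
            (results.foldl (fun s network =>
              match network.lookup "ssid" with
              | some ssid => if ssid ≠ "" then PySem.Set.add s (PySem.Str.strip ssid) else s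
              | none => s) PySem.Set.empty) (fun x => x) false
          = dedupAdj (PySem.List.sorted
            (results.foldl (fun acc network =>
              match network.lookup "ssid" with
              | some ssid => if ssid ≠ "" then acc ++ [PySem.Str.strip ssid] else acc
              | none => acc) []) (fun x => x) false)
        rw [foldA_eq, foldB_eq]
        simp only [List.nil_append]
        exact sorted_set_eq_dedupAdj (results.filterMap pvContrib)
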